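-- pv_equiv track=rewrite | github.com/srkicaa/SEO-TITLE-GEN | dataforseo_simple.py | _find_emotional_words
-- ===== SOURCE A (Python) =====
-- from typing import List, Optional, Dict, Callable, Tuple
--
-- def _find_emotional_words(titles: List[str]) -> List[str]:
--     """Find emotional trigger words in titles"""
--     emotional_words = [
--         'amazing', 'incredible', 'stunning', 'shocking', 'unbelievable',
--         'ultimate', 'best', 'worst', 'epic', 'fantastic', 'awesome',
--         'terrible', 'brilliant', 'perfect', 'horrible', 'wonderful'
--     ]
--
--     found_emotions = []
--     for title in titles:
--         for word in emotional_words: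
--             if word in title.lower() and word not in found_emotions:
--                 found_emotions.append(word)
--
--     return found_emotions[:5]  # Top 5
-- ===== SOURCE B (Python) =====
-- EMOTIONAL_WORDS = [
--     'amazing', 'incredible', 'stunning', 'shocking', 'unbelievable',
--     'ultimate', 'best', 'worst', 'epic', 'fantastic', 'awesome',
--     'terrible', 'brilliant', 'perfect', 'horrible', 'wonderful'
-- ]
--
--
-- def _find_emotional_words(titles):
--     """Index-then-sort: find each word's first title, order by (title, word rank)."""
--     lows = [t.lower() for t in titles]
--     hits = []
--     for pos, word in enumerate(EMOTIONAL_WORDS):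
--         for i, low in enumerate(lows):
--             if word in low:
--                 hits.append((i, pos))
--                 break
--     hits.sort()
--     return [EMOTIONAL_WORDS[pos] for _, pos in hits[:5]]
-- ===== Notes on version B (the rewrite author's own statement) =====
-- stated objective: alternative
-- what changed: Replaces the single-pass append-if-new accumulation over titles with an index-then-sort algorithm: for each emotional word find the index of the first (lowercased) title containing it, sort the (first-title-index, word-rank) pairs, and take the first 5 words.
import Mathlib
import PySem

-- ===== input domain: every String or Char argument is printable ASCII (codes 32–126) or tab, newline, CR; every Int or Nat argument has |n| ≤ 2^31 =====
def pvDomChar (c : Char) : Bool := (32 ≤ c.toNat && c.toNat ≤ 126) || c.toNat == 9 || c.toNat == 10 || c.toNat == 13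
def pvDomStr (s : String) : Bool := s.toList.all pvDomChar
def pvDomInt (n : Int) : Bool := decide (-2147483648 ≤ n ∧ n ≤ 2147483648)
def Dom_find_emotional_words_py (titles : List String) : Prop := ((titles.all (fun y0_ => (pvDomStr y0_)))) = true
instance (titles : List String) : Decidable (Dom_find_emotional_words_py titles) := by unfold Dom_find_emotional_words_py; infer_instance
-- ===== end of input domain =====

-- B replaces A's append-if-new accumulation over titles by an index-then-sort pass
-- (first-title index per word, sort the (index, word rank) pairs, take 5): an alternative algorithm, not claimed faster.

-- the module-level emotional word list (shared constant of both programs)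
def pvEmotionalWords : List String :=
  ["amazing", "incredible", "stunning", "shocking", "unbelievable",
   "ultimate", "best", "worst", "epic", "fantastic", "awesome",
   "terrible", "brilliant", "perfect", "horrible", "wonderful"]

-- ===== PORT A =====
def find_emotional_words_py (titles : List String) : List String :=
  let found := titles.foldl (fun found title =>
    pvEmotionalWords.foldl (fun found word =>
      if PySem.Str.isIn word (PySem.Str.lower title) && !found.contains word
      then found ++ [word] else found) found) []
  PySem.List.slice found none (some 5)

-- ===== PORT B =====
-- the inner 'for i, low in enumerate(lows): if word in low: … break' loop of Source B
def pvFirstHit (word : String) (i : Int) : List String → Option Int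
  | [] => none
  | low :: rest => if PySem.Str.isIn word low then some i else pvFirstHit word (i + 1) rest

def find_emotional_words_py_alt (titles : List String) : List String :=
  let lows := titles.map PySem.Str.lower
  let hits := (PySem.List.enumerate pvEmotionalWords).foldl (fun acc pw =>
    match pvFirstHit pw.2 0 lows with
    | some i => acc ++ [(i, pw.1)]
    | none => acc) []
  let sortedHits := PySem.List.sorted2 hits (fun p => p.1) (fun p => p.2)
  (PySem.List.slice sortedHits none (some 5)).map (fun p => PySem.List.pyGetD pvEmotionalWords p.2 "")

-- ===== PRECONDITION & SPEC =====
def Spec_find_emotional_words_py (titles : List String) (out : List String) : Prop := out = find_emotional_words_py_alt titles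
instance (titles : List String) (out : List String) : Decidable (Spec_find_emotional_words_py titles out) := by unfold Spec_find_emotional_words_py; infer_instance

-- ===== CLAIM (what is proved, stated in full; the proofs are below) =====
def Claim_equal_find_emotional_words_py : Prop := ∀ (titles : List String), Dom_find_emotional_words_py titles → Spec_find_emotional_words_py titles (find_emotional_words_py titles)

-- ===== LEMMAS AND PROOFS =====

theorem pvW_nodup : pvEmotionalWords.Nodup := by decide

-- A's inner loop over the word list appends exactly the new matching words, in word order
theorem pvInner (ws : List String) (hw : ws.Nodup) (low : String) (acc : List String) :
    ws.foldl (fun f w => if PySem.Str.isIn w low && !f.contains w then f ++ [w] else f) acc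
      = acc ++ ws.filter (fun w => PySem.Str.isIn w low && !acc.contains w) := by
  induction ws generalizing acc with
  | nil => simp
  | cons w rest ih =>
    rcases List.nodup_cons.mp hw with ⟨hwn, hrest⟩
    by_cases h : (PySem.Str.isIn w low && !acc.contains w) = true
    · rw [List.foldl_cons, if_pos h, ih hrest]
      have hfeq : rest.filter (fun x => PySem.Str.isIn x low && !(acc ++ [w]).contains x)
          = rest.filter (fun x => PySem.Str.isIn x low && !acc.contains x) := by
        apply List.filter_congr
        intro x hx
        have hne : x ≠ w := fun e => hwn (e ▸ hx)
        simp [List.contains_eq_mem, hne]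
      rw [hfeq, List.filter_cons, if_pos h, List.append_assoc]
      rfl
    · rw [List.foldl_cons, if_neg h, ih hrest, List.filter_cons, if_neg h]

-- the grouped accumulation A performs, one title at a time
def pvBuild : List String → List String → List String
  | acc, [] => acc
  | acc, low :: rest =>
      pvBuild (acc ++ pvEmotionalWords.filter (fun w => PySem.Str.isIn w low && !acc.contains w)) rest

theorem pvA_build (titles : List String) (acc : List String) :
    titles.foldl (fun found title =>
      pvEmotionalWords.foldl (fun found word =>
        if PySem.Str.isIn word (PySem.Str.lower title) && !found.contains word
        then found ++ [word] else found) found) acc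
      = pvBuild acc (titles.map PySem.Str.lower) := by
  induction titles generalizing acc with
  | nil => simp [pvBuild]
  | cons t rest ih =>
    rw [List.foldl_cons, pvInner pvEmotionalWords pvW_nodup (PySem.Str.lower t) acc, ih]
    simp [pvBuild]

theorem pvFirstHit_shift (w : String) (lows : List String) (i : Int) :
    pvFirstHit w i lows = (pvFirstHit w 0 lows).map (fun j => j + i) := by
  induction lows generalizing i with
  | nil => simp [pvFirstHit]
  | cons low rest ih =>
    show (if PySem.Str.isIn w low = true then some i else pvFirstHit w (i + 1) rest)
        = Option.map (fun j => j + i)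
            (if PySem.Str.isIn w low = true then some (0 : Int) else pvFirstHit w (0 + 1) rest)
    by_cases hc : PySem.Str.isIn w low = true
    · rw [if_pos hc, if_pos hc]; simp
    · rw [if_neg hc, if_neg hc, ih (i + 1), ih (0 + 1)]
      cases pvFirstHit w 0 rest <;> simp <;> ring

theorem pvFirstHit_bound_aux (w : String) (lows : List String) (i j : Int) :
    pvFirstHit w i lows = some j → i ≤ j ∧ j < i + lows.length := by
  induction lows generalizing i with
  | nil => intro h; simp [pvFirstHit] at h
  | cons low rest ih =>
    rw [show pvFirstHit w i (low :: rest)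
        = (if PySem.Str.isIn w low = true then some i else pvFirstHit w (i + 1) rest) from rfl]
    intro h
    by_cases hc : PySem.Str.isIn w low = true
    · rw [if_pos hc] at h
      cases h; simp
    · rw [if_neg hc] at h
      have := ih (i + 1) h
      simp only [List.length_cons]
      push_cast
      omega

theorem pvFirstHit_bound (w : String) (lows : List String) (j : Int)
    (h : pvFirstHit w 0 lows = some j) : 0 ≤ j ∧ j < lows.length := by
  have := pvFirstHit_bound_aux w lows 0 j h
  omega

-- characterisation of pvBuild: the words grouped by the index of the first title containing them
theorem pvBuild_char (lows : List String) (acc : List String) :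
    pvBuild acc lows
      = acc ++ (List.range lows.length).flatMap (fun (k : Nat) =>
          pvEmotionalWords.filter (fun w =>
            !acc.contains w && (pvFirstHit w 0 lows == some ((k : Nat) : Int)))) := by
  induction lows generalizing acc with
  | nil => simp [pvBuild]
  | cons low rest ih =>
    rw [show pvBuild acc (low :: rest)
        = pvBuild (acc ++ pvEmotionalWords.filter
            (fun w => PySem.Str.isIn w low && !acc.contains w)) rest from rfl, ih]
    rw [List.length_cons, List.range_succ_eq_map, List.flatMap_cons, List.flatMap_map]
    rw [← List.append_assoc]
    congr 1
    · -- group 0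
      congr 1
      apply List.filter_congr
      intro w hw
      rw [show pvFirstHit w 0 (low :: rest)
          = (if PySem.Str.isIn w low = true then some (0 : Int) else pvFirstHit w (0 + 1) rest)
          from rfl]
      by_cases hc : PySem.Str.isIn w low = true
      · rw [if_pos hc]
        simp only [PySem.Str.isIn_eq] at hc
        simp [hc, Bool.and_comm]
      · rw [if_neg hc, pvFirstHit_shift w rest (0 + 1)]
        simp only [PySem.Str.isIn_eq] at hc
        cases hb : pvFirstHit w 0 rest with
        | none => simp [hc]
        | some j =>
          have hbd := pvFirstHit_bound w rest j hb
          have hne : j + 1 ≠ (0 : Int) := by omega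
          simp [hc, hne]
    · -- shifted groups
      apply List.flatMap_congr
      intro k _
      apply List.filter_congr
      intro w hw
      have hNw : (acc ++ pvEmotionalWords.filter
          (fun w => PySem.Str.isIn w low && !acc.contains w)).contains w
          = (acc.contains w || (PySem.Str.isIn w low && !acc.contains w)) := by
        by_cases h1 : acc.contains w = true <;>
          by_cases h2 : PySem.Str.isIn w low = true <;>
            simp [List.contains_eq_mem, List.mem_filter, hw, h1, h2] <;>
              simp [List.contains_eq_mem] at h1 h2 ⊢ <;> tauto
      rw [hNw, show pvFirstHit w 0 (low :: rest)
          = (if PySem.Str.isIn w low = true then some (0 : Int) else pvFirstHit w (0 + 1) rest)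
          from rfl]
      by_cases hc : PySem.Str.isIn w low = true
      · rw [if_pos hc]
        simp only [PySem.Str.isIn_eq] at hc
        by_cases h1 : acc.contains w = true <;> simp [h1, hc]
        all_goals intros
        all_goals omega
      · rw [if_neg hc, pvFirstHit_shift w rest (0 + 1)]
        simp only [PySem.Str.isIn_eq] at hc
        cases hb : pvFirstHit w 0 rest with
        | none => simp [hc]
        | some j =>
          simp [hc]
          congr 1
          rw [Bool.eq_iff_iff]
          simp

-- B side: the hits loop is a filterMap
def pvHitOf (lows : List String) (pw : Int × String) : Option (Int × Int) :=
  (pvFirstHit pw.2 0 lows).map (fun i => (i, pw.1))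

theorem pvHits_eq (lows : List String) (l : List (Int × String)) (acc : List (Int × Int)) :
    l.foldl (fun acc pw =>
      match pvFirstHit pw.2 0 lows with
      | some i => acc ++ [(i, pw.1)]
      | none => acc) acc
      = acc ++ l.filterMap (pvHitOf lows) := by
  induction l generalizing acc with
  | nil => simp
  | cons pw rest ih =>
    rw [List.foldl_cons, List.filterMap_cons]
    cases hb : pvFirstHit pw.2 0 lows with
    | none =>
      rw [show pvHitOf lows pw = none from by simp [pvHitOf, hb]]
      exact ih acc
    | some i =>
      rw [show pvHitOf lows pw = some (i, pw.1) from by simp [pvHitOf, hb]]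
      exact (ih (acc ++ [(i, pw.1)])).trans (by simp)

-- the strictly (index, rank)-increasing arrangement of the hits
def pvGroup (lows : List String) (k : Nat) : List (Int × Int) :=
  (PySem.List.enumerate pvEmotionalWords 0).filterMap (fun pw =>
    if pvFirstHit pw.2 0 lows == some (k : Int) then some (((k : Int)), pw.1) else none)

def pvS (lows : List String) : List (Int × Int) :=
  (List.range lows.length).flatMap (pvGroup lows)

theorem pvGroup_mem_iff (lows : List String) (k : Nat) (a : Int × Int) :
    a ∈ pvGroup lows k ↔ ∃ pw ∈ PySem.List.enumerate pvEmotionalWords 0,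
      pvFirstHit pw.2 0 lows = some (k : Int) ∧ a = ((k : Int), pw.1) := by
  unfold pvGroup
  rw [List.mem_filterMap]
  constructor
  · rintro ⟨pw, hpw, h⟩
    split at h
    · next hcond =>
      exact ⟨pw, hpw, by simpa using hcond, by simpa using h.symm⟩
    · exact absurd h (by simp)
  · rintro ⟨pw, hpw, h1, rfl⟩
    exact ⟨pw, hpw, by simp [h1]⟩

theorem pvHits_mem_iff (lows : List String) (a : Int × Int) :
    a ∈ (PySem.List.enumerate pvEmotionalWords 0).filterMap (pvHitOf lows)
      ↔ ∃ pw ∈ PySem.List.enumerate pvEmotionalWords 0,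
          pvFirstHit pw.2 0 lows = some a.1 ∧ a.2 = pw.1 := by
  rw [List.mem_filterMap]
  constructor
  · rintro ⟨pw, hpw, h⟩
    rcases Option.map_eq_some_iff.mp h with ⟨i, hi, rfl⟩
    exact ⟨pw, hpw, hi, rfl⟩
  · rintro ⟨pw, hpw, h1, h2⟩
    refine ⟨pw, hpw, ?_⟩
    simp [pvHitOf, h1]
    exact Prod.ext rfl h2.symm

theorem pvHits_nodup (lows : List String) :
    ((PySem.List.enumerate pvEmotionalWords 0).filterMap (pvHitOf lows)).Nodup := by
  have hp : List.Pairwise (fun a b : Int × Int => a.2 < b.2)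
      ((PySem.List.enumerate pvEmotionalWords 0).filterMap (pvHitOf lows)) := by
    rw [List.pairwise_filterMap]
    refine (PySem.List.pairwise_lt_enumerate pvEmotionalWords 0).imp ?_
    intro pw pw' h b hb b' hb'
    rcases Option.map_eq_some_iff.mp hb with ⟨i, _, rfl⟩
    rcases Option.map_eq_some_iff.mp hb' with ⟨i', _, rfl⟩
    exact h
  exact hp.imp (fun h e => by subst e; exact lt_irrefl _ h)

theorem pvS_pairwise (lows : List String) :
    List.Pairwise (fun a b : Int × Int => a.1 < b.1 ∨ (a.1 = b.1 ∧ a.2 < b.2)) (pvS lows) := by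
  unfold pvS
  rw [List.pairwise_flatMap]
  constructor
  · intro k _
    unfold pvGroup
    rw [List.pairwise_filterMap]
    refine (PySem.List.pairwise_lt_enumerate pvEmotionalWords 0).imp ?_
    intro pw pw' h b hb b' hb'
    split at hb
    · split at hb'
      · cases hb; cases hb'; exact Or.inr ⟨rfl, h⟩
      · exact absurd hb' (by simp)
    · exact absurd hb (by simp)
  · refine List.pairwise_lt_range.imp ?_
    intro k k' hkk x hx y hy
    rcases (pvGroup_mem_iff lows k x).mp hx with ⟨_, _, _, rfl⟩
    rcases (pvGroup_mem_iff lows k' y).mp hy with ⟨_, _, _, rfl⟩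
    refine Or.inl ?_
    show ((k : Nat) : Int) < ((k' : Nat) : Int)
    exact_mod_cast hkk

theorem pvS_nodup (lows : List String) : (pvS lows).Nodup :=
  (pvS_pairwise lows).imp (fun h e => by
    subst e
    rcases h with h | ⟨_, h⟩ <;> exact lt_irrefl _ h)

theorem pvS_perm (lows : List String) :
    (pvS lows).Perm ((PySem.List.enumerate pvEmotionalWords 0).filterMap (pvHitOf lows)) := by
  rw [List.perm_ext_iff_of_nodup (pvS_nodup lows) (pvHits_nodup lows)]
  intro a
  rw [pvHits_mem_iff]
  unfold pvS
  rw [List.mem_flatMap]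
  constructor
  · rintro ⟨k, hk, ha⟩
    rcases (pvGroup_mem_iff lows k a).mp ha with ⟨pw, hpw, h1, rfl⟩
    exact ⟨pw, hpw, h1, rfl⟩
  · rintro ⟨pw, hpw, h1, h2⟩
    have hb := pvFirstHit_bound pw.2 lows a.1 h1
    refine ⟨a.1.toNat, ?_, ?_⟩
    · rw [List.mem_range]; omega
    · rw [pvGroup_mem_iff]
      refine ⟨pw, hpw, ?_, ?_⟩
      · rw [Int.toNat_of_nonneg hb.1]; exact h1
      · rw [Int.toNat_of_nonneg hb.1]; exact Prod.ext rfl h2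
    
-- Python's tuple sort on (Int, Int) pairs is the sort by the lexicographic key
theorem pv_sorted2_eq (xs : List (Int × Int)) :
    PySem.List.sorted2 xs (fun p => p.1) (fun p => p.2)
      = PySem.List.sorted xs (fun p => (toLex (p.1, p.2) : Lex (Int × Int))) := by
  show List.foldl (fun acc x => PySem.List.insertBy
      (fun a b : Int × Int => decide (a.1 < b.1) || (!decide (b.1 < a.1) && decide (a.2 < b.2))) x acc) [] xs
    = List.foldl (fun acc x => PySem.List.insertBy
      (fun a b : Int × Int => decide ((toLex (a.1, a.2) : Lex (Int × Int)) < toLex (b.1, b.2))) x acc) [] xs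
  have hb : (fun a b : Int × Int => decide (a.1 < b.1) || (!decide (b.1 < a.1) && decide (a.2 < b.2)))
      = (fun a b : Int × Int => decide ((toLex (a.1, a.2) : Lex (Int × Int)) < toLex (b.1, b.2))) := by
    funext a b
    by_cases h1 : a.1 < b.1 <;> by_cases h2 : b.1 < a.1 <;> by_cases h3 : a.2 < b.2 <;>
      simp [Prod.Lex.lt_iff, h1, h2, h3] <;> omega
  rw [hb]

theorem pvSorted_hits (lows : List String) :
    PySem.List.sorted2 ((PySem.List.enumerate pvEmotionalWords 0).filterMap (pvHitOf lows))
      (fun p => p.1) (fun p => p.2) = pvS lows := by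
  rw [pv_sorted2_eq]
  apply PySem.List.sorted_eq_of_perm_of_pairwise_lt
  · exact pvS_perm lows
  · refine (pvS_pairwise lows).imp ?_
    intro a b h
    rw [Prod.Lex.lt_iff]
    simpa using h

theorem pvFilterMap_enum (pred : String → Bool) (l : List String) (s : Int) :
    (PySem.List.enumerate l s).filterMap (fun pw => if pred pw.2 then some pw.2 else none)
      = l.filter pred := by
  induction l generalizing s with
  | nil => simp [PySem.List.enumerate]
  | cons x rest ih =>
    rw [PySem.List.enumerate_cons, List.filterMap_cons, List.filter_cons]
    by_cases h : pred x = true <;> simp [h, ih]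

theorem pvGroup_map (lows : List String) (k : Nat) :
    (pvGroup lows k).map (fun p => PySem.List.pyGetD pvEmotionalWords p.2 "")
      = pvEmotionalWords.filter (fun w => pvFirstHit w 0 lows == some (k : Int)) := by
  unfold pvGroup
  rw [List.map_filterMap]
  rw [List.filterMap_congr
    (g := fun pw : Int × String => if pvFirstHit pw.2 0 lows == some (k : Int) then some pw.2 else none)]
  · exact pvFilterMap_enum (fun w => pvFirstHit w 0 lows == some ((k : Nat) : Int)) pvEmotionalWords 0
  · intro pw hpw
    rcases (PySem.List.mem_enumerate_iff pvEmotionalWords 0 pw).mp hpw with ⟨j, hj, rfl⟩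
    by_cases h : pvFirstHit (pvEmotionalWords[j]) 0 lows == some (k : Int) <;>
      simp [h, PySem.List.pyGetD_natCast, List.getD_eq_getElem?_getD, hj]

-- the common normal form of both programs
theorem pvA_char (titles : List String) :
    find_emotional_words_py titles
      = ((List.range (titles.map PySem.Str.lower).length).flatMap (fun (k : Nat) =>
          pvEmotionalWords.filter (fun w =>
            pvFirstHit w 0 (titles.map PySem.Str.lower) == some ((k : Nat) : Int)))).take 5 := by
  show PySem.List.slice _ none (some 5) = _
  rw [pvA_build, pvBuild_char, PySem.List.slice_to _ (by norm_num)]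
  simp

theorem pvB_char (titles : List String) :
    find_emotional_words_py_alt titles
      = ((List.range (titles.map PySem.Str.lower).length).flatMap (fun (k : Nat) =>
          pvEmotionalWords.filter (fun w =>
            pvFirstHit w 0 (titles.map PySem.Str.lower) == some ((k : Nat) : Int)))).take 5 := by
  show (PySem.List.slice
      (PySem.List.sorted2
        ((PySem.List.enumerate pvEmotionalWords 0).foldl (fun acc pw =>
          match pvFirstHit pw.2 0 (titles.map PySem.Str.lower) with
          | some i => acc ++ [(i, pw.1)]
          | none => acc) [])
        (fun p => p.1) (fun p => p.2))
      none (some 5)).map (fun p => PySem.List.pyGetD pvEmotionalWords p.2 "") = _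
  rw [pvHits_eq, List.nil_append, pvSorted_hits, PySem.List.slice_to _ (by norm_num)]
  rw [List.map_take]
  congr 1
  unfold pvS
  rw [List.map_flatMap]
  exact List.flatMap_congr (fun k _ => pvGroup_map (titles.map PySem.Str.lower) k)

-- ===== VERDICT (by name: the statement is the Claim_ definition above) =====
theorem find_emotional_words_py_spec : Claim_equal_find_emotional_words_py := by
  intro titles _
  show find_emotional_words_py titles = find_emotional_words_py_alt titles
  rw [pvA_char, pvB_char]
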